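-- pv_equiv track=rewrite | github.com/Naazimsnh02/lore | backend/services/content_parser/serializer.py | _decode_narration_tone
-- ===== SOURCE A (Python) =====
-- def _decode_narration_tone(
--     emotional_tone: str | None,
-- ) -> tuple[str, str, str, str]:
--     """Decode the compact narration tone string.
--
--     Format: "tone[;lang=<l>][;depth=<d>][;audio_url=<u>]"
--
--     Returns:
--         (tone, language, depth_level, audio_url)
--     """
--     tone = "neutral"
--     language = "en"
--     depth_level = "explorer"
--     audio_url = ""
--
--     if not emotional_tone:
--         return tone, language, depth_level, audio_url
--
--     parts = emotional_tone.split(";")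
--     if parts:
--         tone = parts[0] or "neutral"
--     for part in parts[1:]:
--         if part.startswith("lang="):
--             language = part[5:]
--         elif part.startswith("depth="):
--             depth_level = part[6:]
--         elif part.startswith("audio_url="):
--             audio_url = part[10:]
--
--     return tone, language, depth_level, audio_url
-- ===== SOURCE B (Python) =====
-- def _decode_narration_tone(
--     emotional_tone: str | None,
-- ) -> tuple[str, str, str, str]:
--     """Decode the compact narration tone string via a key->value table."""
--     if not emotional_tone:
--         return "neutral", "en", "explorer", ""
--     parts = emotional_tone.split(";")
--     d = dict(p.split("=", 1) for p in parts[1:] if "=" in p)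
--     return (
--         parts[0] or "neutral",
--         d.get("lang", "en"),
--         d.get("depth", "explorer"),
--         d.get("audio_url", ""),
--     )
-- ===== Notes on version B (the rewrite author's own statement) =====
-- stated objective: idiomatic
-- what changed: Replaces the three-accumulator branch-per-prefix scan with a single key->value dict built from the '='-bearing tail parts (split('=',1), last write wins) followed by three defaulted lookups.
import Mathlib
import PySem

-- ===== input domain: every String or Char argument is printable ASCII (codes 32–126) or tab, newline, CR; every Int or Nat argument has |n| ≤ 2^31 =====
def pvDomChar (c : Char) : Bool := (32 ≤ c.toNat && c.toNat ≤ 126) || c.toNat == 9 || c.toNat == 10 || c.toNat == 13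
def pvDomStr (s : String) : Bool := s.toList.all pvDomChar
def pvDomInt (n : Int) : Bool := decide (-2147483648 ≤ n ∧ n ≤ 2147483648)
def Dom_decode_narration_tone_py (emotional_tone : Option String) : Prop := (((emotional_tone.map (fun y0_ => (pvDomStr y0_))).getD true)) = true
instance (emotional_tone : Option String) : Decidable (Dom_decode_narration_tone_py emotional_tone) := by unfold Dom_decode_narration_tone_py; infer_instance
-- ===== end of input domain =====

-- B replaces A's three-accumulator prefix-branch scan by one key→value dict built from the
-- '='-bearing tail parts plus three defaulted lookups (idiomatic; same cost, return value only).

-- ===== PORT A =====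
def decode_narration_tone_py (emotional_tone : Option String) : String × String × String × String :=
  match emotional_tone with
  | none => ("neutral", "en", "explorer", "")
  | some s =>
    if s = "" then ("neutral", "en", "explorer", "")
    else
      -- parts = emotional_tone.split(";")  (split? is some: sep ";" ≠ "")
      let parts := (PySem.Str.split? s ";").getD []
      -- if parts: tone = parts[0] or "neutral"
      let tone := match parts with
        | [] => "neutral"
        | p :: _ => if p = "" then "neutral" else p
      -- for part in parts[1:]: three prefix branches over (language, depth_level, audio_url)
      let st := (PySem.List.slice parts (some 1) none).foldl
        (fun (st : String × String × String) part =>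
          if PySem.Str.startswith part "lang=" then
            (PySem.Str.slice part (some 5) none, st.2.1, st.2.2)
          else if PySem.Str.startswith part "depth=" then
            (st.1, PySem.Str.slice part (some 6) none, st.2.2)
          else if PySem.Str.startswith part "audio_url=" then
            (st.1, st.2.1, PySem.Str.slice part (some 10) none)
          else st)
        ("en", "explorer", "")
      (tone, st.1, st.2.1, st.2.2)

-- ===== PORT B =====
def decode_narration_tone_py_alt (emotional_tone : Option String) : String × String × String × String :=
  match emotional_tone with
  | none => ("neutral", "en", "explorer", "")
  | some s =>
    if s = "" then ("neutral", "en", "explorer", "")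
    else
      let parts := (PySem.Str.split? s ";").getD []
      -- d = dict(p.split("=", 1) for p in parts[1:] if "=" in p)
      let d : PySem.Dict String String :=
        ((PySem.List.slice parts (some 1) none).filter
            (fun p => PySem.Str.isIn "=" p)).foldl
          (fun d p =>
            match (PySem.Str.splitMax? p "=" 1).getD [] with
            | [k, v] => d.insert k v
            | _ => d)   -- unreachable: p contains "=", so split("=", 1) yields exactly two pieces
          PySem.Dict.empty
      -- parts[0] or "neutral"  (split(";") is never empty, so parts[0] cannot raise)
      let t := parts.headD ""
      (if t = "" then "neutral" else t,
       d.getD "lang" "en", d.getD "depth" "explorer", d.getD "audio_url" "")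

-- ===== PRECONDITION & SPEC =====
def Spec_decode_narration_tone_py (emotional_tone : Option String) (out : String × String × String × String) : Prop := out = decode_narration_tone_py_alt emotional_tone
instance (emotional_tone : Option String) (out : String × String × String × String) : Decidable (Spec_decode_narration_tone_py emotional_tone out) := by unfold Spec_decode_narration_tone_py; infer_instance

-- ===== CLAIM (what is proved, stated in full; the proofs are below) =====
def Claim_equal_decode_narration_tone_py : Prop := ∀ (emotional_tone : Option String), Dom_decode_narration_tone_py emotional_tone → Spec_decode_narration_tone_py emotional_tone (decode_narration_tone_py emotional_tone)


-- ===== LEMMAS AND PROOFS =====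

-- splitOnMax.go with maxsplit exhausted returns the rest as one piece
lemma pv_go_zero (f : Nat) (l cur : List Char) (acc : List (List Char)) :
    PySem.Chars.splitOnMax.go ['='] f 0 l cur acc = acc.reverse ++ [cur.reverse ++ l] := by
  cases f with
  | zero => simp [PySem.Chars.splitOnMax.go]
  | succ f => cases l with
    | nil => simp [PySem.Chars.splitOnMax.go]
    | cons c rest => simp [PySem.Chars.splitOnMax.go]

lemma pv_go_one (k : List Char) : ∀ (f : Nat) (v cur : List Char) (acc : List (List Char)),
    '=' ∉ k → k.length < f →
    PySem.Chars.splitOnMax.go ['='] f 1 (k ++ '=' :: v) cur acc = acc.reverse ++ [cur.reverse ++ k, v] := by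
  induction k with
  | nil =>
    intro f v cur acc _ hf
    cases f with
    | zero => omega
    | succ f => simp [PySem.Chars.splitOnMax.go, List.isPrefixOf, pv_go_zero]
  | cons c k ih =>
    intro f v cur acc hk hf
    cases f with
    | zero => simp at hf
    | succ f =>
      have hc : c ≠ '=' := fun h => hk (h ▸ List.mem_cons_self ..)
      simp only [List.cons_append, PySem.Chars.splitOnMax.go]
      simp [List.isPrefixOf, hc.symm,
        ih f v (c :: cur) acc (fun h => hk (List.mem_cons_of_mem _ h)) (by simpa using hf)]

-- s.split("=", 1) on k ++ "=" ++ v with no '=' in k is exactly [k, v]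
lemma pv_splitMax_one (k v : List Char) (hk : '=' ∉ k) :
    PySem.Chars.splitMax? (k ++ '=' :: v) ['='] 1 = some [k, v] := by
  have h := pv_go_one k (k.length + (v.length + 1) + 1) v [] [] hk (by omega)
  simp [PySem.Chars.splitMax?, PySem.Chars.splitOnMax, h]

-- any char list containing '=' splits as k ++ '=' :: v with '=' ∉ k
lemma pv_exists_split (cs : List Char) (h : '=' ∈ cs) :
    ∃ k v, cs = k ++ '=' :: v ∧ '=' ∉ k := by
  induction cs with
  | nil => simp at h
  | cons c cs ih =>
    by_cases hc : c = '='
    · exact ⟨[], cs, by simp [hc], by simp⟩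
    · have h' : '=' ∈ cs := by
        rcases List.mem_cons.mp h with h | h
        · exact absurd h.symm hc
        · exact h
      obtain ⟨k, v, hkv, hk⟩ := ih h'
      refine ⟨c :: k, v, by simp [hkv], fun hmem => ?_⟩
      rcases List.mem_cons.mp hmem with h | h
      · exact hc h.symm
      · exact hk h

-- "=" in p  ↔  '=' occurs in p
lemma pv_isIn_iff (p : String) : PySem.Str.isIn "=" p = true ↔ '=' ∈ p.toList := by
  rw [PySem.Str.isIn_iff_infix]
  have h : ("=" : String).toList = ['='] := by decide
  rw [h, List.singleton_infix_iff]

lemma pv_startswith_iff (p pre : String) :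
    PySem.Str.startswith p pre = true ↔ pre.toList <+: p.toList := by
  rw [PySem.Str.startswith_eq, PySem.Chars.startswith_iff]

-- a part that startswith "<key>=" yields under split("=", 1) the key and the suffix p[n:]
lemma pv_key_case (p pre key : String) (n : Int)
    (hpre : pre.toList = key.toList ++ ['='])
    (hkey : '=' ∉ key.toList)
    (hn : n = (pre.toList.length : Int))
    (hsw : PySem.Str.startswith p pre = true) :
    PySem.Str.isIn "=" p = true ∧
    (PySem.Str.splitMax? p "=" 1).getD [] = [key, PySem.Str.slice p (some n) none] := by
  obtain ⟨r, hr⟩ := (pv_startswith_iff p pre).mp hsw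
  have hp : p.toList = key.toList ++ '=' :: r := by
    rw [← hr, hpre]; simp
  constructor
  · exact (pv_isIn_iff p).mpr (by rw [hp]; simp)
  · have hS : (PySem.Str.splitMax? p "=" 1).getD []
        = [String.ofList key.toList, String.ofList r] := by
      have h1 : ("=" : String).toList = ['='] := by decide
      rw [PySem.Str.splitMax?, h1, hp, pv_splitMax_one key.toList r hkey]
      simp
    have hslice : PySem.Str.slice p (some n) none = String.ofList r := by
      apply String.toList_inj.mp
      rw [PySem.Str.toList_slice, PySem.Chars.slice_eq_listSlice,
        String.toList_ofList, hn, PySem.List.slice_from p.toList (by positivity), hp]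
      have hnn : ((pre.toList.length : Int)).toNat = key.toList.length + 1 := by
        rw [hpre]; simp
      rw [hnn, show key.toList ++ '=' :: r = (key.toList ++ ['=']) ++ r by simp,
        List.drop_left' (by simp)]
    rw [hS, hslice, String.ofList_toList]

-- One loop step preserves the correspondence between A's triple and B's dict
lemma pv_step (p : String) (st : String × String × String) (d : PySem.Dict String String)
    (h1 : st.1 = d.getD "lang" "en") (h2 : st.2.1 = d.getD "depth" "explorer")
    (h3 : st.2.2 = d.getD "audio_url" "") :
    let st' := (fun (st : String × String × String) part =>
          if PySem.Str.startswith part "lang=" then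
            (PySem.Str.slice part (some 5) none, st.2.1, st.2.2)
          else if PySem.Str.startswith part "depth=" then
            (st.1, PySem.Str.slice part (some 6) none, st.2.2)
          else if PySem.Str.startswith part "audio_url=" then
            (st.1, st.2.1, PySem.Str.slice part (some 10) none)
          else st) st p
    let d' := if PySem.Str.isIn "=" p then
          (fun (d : PySem.Dict String String) p =>
            match (PySem.Str.splitMax? p "=" 1).getD [] with
            | [k, v] => d.insert k v
            | _ => d) d p
        else d
    st'.1 = d'.getD "lang" "en" ∧ st'.2.1 = d'.getD "depth" "explorer" ∧
      st'.2.2 = d'.getD "audio_url" "" := by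
  intro st' d'
  by_cases hL : PySem.Str.startswith p "lang=" = true
  · obtain ⟨hIn, hS⟩ := pv_key_case p "lang=" "lang" 5 (by decide) (by decide) (by decide) hL
    have hd' : d' = d.insert "lang" (PySem.Str.slice p (some 5) none) := by
      simp only [d', hIn, if_true, hS]
    have hst' : st' = (PySem.Str.slice p (some 5) none, st.2.1, st.2.2) := by
      simp only [st', hL, if_true]
    rw [hst', hd']
    refine ⟨(PySem.Dict.getD_insert_self d _ _ _).symm, ?_, ?_⟩
    · rw [PySem.Dict.getD_insert_of_ne d _ _ (show ("depth" : String) ≠ "lang" by decide)]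
      exact h2
    · rw [PySem.Dict.getD_insert_of_ne d _ _ (show ("audio_url" : String) ≠ "lang" by decide)]
      exact h3
  · by_cases hD : PySem.Str.startswith p "depth=" = true
    · obtain ⟨hIn, hS⟩ := pv_key_case p "depth=" "depth" 6 (by decide) (by decide) (by decide) hD
      have hd' : d' = d.insert "depth" (PySem.Str.slice p (some 6) none) := by
        simp only [d', hIn, if_true, hS]
      have hst' : st' = (st.1, PySem.Str.slice p (some 6) none, st.2.2) := by
        simp only [st', hL, hD, Bool.false_eq_true, if_false, if_true]
      rw [hst', hd']
      refine ⟨?_, (PySem.Dict.getD_insert_self d _ _ _).symm, ?_⟩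
      · rw [PySem.Dict.getD_insert_of_ne d _ _ (show ("lang" : String) ≠ "depth" by decide)]
        exact h1
      · rw [PySem.Dict.getD_insert_of_ne d _ _ (show ("audio_url" : String) ≠ "depth" by decide)]
        exact h3
    · by_cases hA : PySem.Str.startswith p "audio_url=" = true
      · obtain ⟨hIn, hS⟩ := pv_key_case p "audio_url=" "audio_url" 10 (by decide) (by decide) (by decide) hA
        have hd' : d' = d.insert "audio_url" (PySem.Str.slice p (some 10) none) := by
          simp only [d', hIn, if_true, hS]
        have hst' : st' = (st.1, st.2.1, PySem.Str.slice p (some 10) none) := by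
          simp only [st', hL, hD, hA, Bool.false_eq_true, if_false, if_true]
        rw [hst', hd']
        refine ⟨?_, ?_, (PySem.Dict.getD_insert_self d _ _ _).symm⟩
        · rw [PySem.Dict.getD_insert_of_ne d _ _ (show ("lang" : String) ≠ "audio_url" by decide)]
          exact h1
        · rw [PySem.Dict.getD_insert_of_ne d _ _ (show ("depth" : String) ≠ "audio_url" by decide)]
          exact h2
      · -- none of the three prefixes matches: A leaves the triple unchanged
        have hst' : st' = st := by
          simp only [st', hL, hD, hA, Bool.false_eq_true, if_false]
        by_cases hIn : PySem.Str.isIn "=" p = true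
        · -- p still carries '=': B inserts under some other key, invisible to the three lookups
          obtain ⟨k, v, hkv, hk⟩ := pv_exists_split p.toList ((pv_isIn_iff p).mp hIn)
          have hS : (PySem.Str.splitMax? p "=" 1).getD []
              = [String.ofList k, String.ofList v] := by
            have h1' : ("=" : String).toList = ['='] := by decide
            rw [PySem.Str.splitMax?, h1', hkv, pv_splitMax_one k v hk]
            simp
          have hd' : d' = d.insert (String.ofList k) (String.ofList v) := by
            simp only [d', hIn, if_true, hS]
          have hne : ∀ (key : String), PySem.Str.startswith p (key ++ "=") = false →
              '=' ∉ key.toList → key ≠ String.ofList k := by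
            intro key hkeyF hkeyNo heq
            have hkk : k = key.toList := by
              have := congrArg String.toList heq
              rw [String.toList_ofList] at this
              exact this.symm
            have : PySem.Str.startswith p (key ++ "=") = true := by
              rw [pv_startswith_iff]
              exact ⟨v, by rw [hkv, hkk]; simp⟩
            rw [hkeyF] at this; exact absurd this (by simp)
          rw [hst', hd']
          refine ⟨?_, ?_, ?_⟩
          · rw [PySem.Dict.getD_insert_of_ne d _ _
              (hne "lang" (by simpa using hL) (by decide))]; exact h1
          · rw [PySem.Dict.getD_insert_of_ne d _ _
              (hne "depth" (by simpa using hD) (by decide))]; exact h2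
          · rw [PySem.Dict.getD_insert_of_ne d _ _
              (hne "audio_url" (by simpa using hA) (by decide))]; exact h3
        · have hd' : d' = d := by
            simp only [d', hIn, Bool.false_eq_true, if_false]
          rw [hst', hd']; exact ⟨h1, h2, h3⟩

-- the whole tail loop: A's accumulator triple equals B's dict lookups
lemma pv_loop (ps : List String) : ∀ (st : String × String × String) (d : PySem.Dict String String),
    st.1 = d.getD "lang" "en" → st.2.1 = d.getD "depth" "explorer" →
    st.2.2 = d.getD "audio_url" "" →
    let stf := ps.foldl (fun (st : String × String × String) part =>
          if PySem.Str.startswith part "lang=" then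
            (PySem.Str.slice part (some 5) none, st.2.1, st.2.2)
          else if PySem.Str.startswith part "depth=" then
            (st.1, PySem.Str.slice part (some 6) none, st.2.2)
          else if PySem.Str.startswith part "audio_url=" then
            (st.1, st.2.1, PySem.Str.slice part (some 10) none)
          else st) st
    let df := (ps.filter (fun p => PySem.Str.isIn "=" p)).foldl
          (fun (d : PySem.Dict String String) p =>
            match (PySem.Str.splitMax? p "=" 1).getD [] with
            | [k, v] => d.insert k v
            | _ => d) d
    stf.1 = df.getD "lang" "en" ∧ stf.2.1 = df.getD "depth" "explorer" ∧
      stf.2.2 = df.getD "audio_url" "" := by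
  induction ps with
  | nil => intro st d h1 h2 h3; exact ⟨h1, h2, h3⟩
  | cons p ps ih =>
    intro st d h1 h2 h3
    obtain ⟨g1, g2, g3⟩ := pv_step p st d h1 h2 h3
    have hfoldd : ((p :: ps).filter (fun p => PySem.Str.isIn "=" p)).foldl
          (fun (d : PySem.Dict String String) p =>
            match (PySem.Str.splitMax? p "=" 1).getD [] with
            | [k, v] => d.insert k v
            | _ => d) d
        = (ps.filter (fun p => PySem.Str.isIn "=" p)).foldl
          (fun (d : PySem.Dict String String) p =>
            match (PySem.Str.splitMax? p "=" 1).getD [] with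
            | [k, v] => d.insert k v
            | _ => d)
          (if PySem.Str.isIn "=" p then
            (match (PySem.Str.splitMax? p "=" 1).getD [] with
              | [k, v] => d.insert k v
              | _ => d)
          else d) := by
      by_cases h : PySem.Str.isIn "=" p = true
      · rw [List.filter_cons, if_pos h, if_pos h, List.foldl_cons]
      · rw [List.filter_cons, if_neg h, if_neg h]
    simp only [List.foldl_cons, hfoldd]
    exact ih _ _ g1 g2 g3

-- ===== VERDICT (by name: the statement is the Claim_ definition above) =====
theorem decode_narration_tone_py_spec : Claim_equal_decode_narration_tone_py := by
  intro et _
  unfold Spec_decode_narration_tone_py decode_narration_tone_py decode_narration_tone_py_alt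
  cases et with
  | none => rfl
  | some s =>
    by_cases hs : s = ""
    · simp only [hs, if_true]
    · simp only [hs, if_false]
      obtain ⟨g1, g2, g3⟩ := pv_loop
        (PySem.List.slice ((PySem.Str.split? s ";").getD []) (some 1) none)
        ("en", "explorer", "") PySem.Dict.empty
        (by rw [PySem.Dict.getD_empty]) (by rw [PySem.Dict.getD_empty])
        (by rw [PySem.Dict.getD_empty])
      rw [Prod.mk.injEq, Prod.mk.injEq, Prod.mk.injEq]
      refine ⟨?_, g1, g2, g3⟩
      cases (PySem.Str.split? s ";").getD [] with
      | nil => rfl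
      | cons p ps => rfl
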